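-- pv_equiv track=rewrite | github.com/fkie-cad/spmac | g-sidon-sets/compute_rulers.py | ruler_diff
-- ===== SOURCE A (Python) =====
-- def ruler_diff(list, copies):
--     if not is_sidon_set(list, copies):
--         return None
--     diffs = {}
--     for i in range(len(list)):
--         for j in range(i+1, len(list)):
--             d = list[i] - list[j]
--             if d<0:
--                 d=-d
--             if d not in diffs:
--                 diffs[d]=0
--             diffs[d]+=1
--     return diffs
--
-- def is_sidon_set(list, g):
--     diffs = {}
--     for i in range(len(list)):
--         for j in range(i+1, len(list)):
--             d = list[i] - list[j]
--             if d<0: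
--                 d=-d
--             if d not in diffs:
--                 diffs[d] = 0
--             diffs[d]+=1
--
--             if diffs[d] > g:
--                 return False
--
--     return True
-- ===== SOURCE B (Python) =====
-- def ruler_diff(list, copies):
--     diffs = {}
--     n = len(list)
--     for i in range(n):
--         for j in range(i + 1, n):
--             d = abs(list[i] - list[j])
--             c = diffs.get(d, 0) + 1
--             if c > copies:
--                 return None
--             diffs[d] = c
--     return diffs
-- ===== Notes on version B (the rewrite author's own statement) =====
-- stated objective: simpler
-- what changed: Fused A's separate is_sidon_set validation pass and second histogram-building pass into one double loop that accumulates the histogram and returns None immediately when any difference count exceeds copies, dropping the helper entirely.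
import Mathlib
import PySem

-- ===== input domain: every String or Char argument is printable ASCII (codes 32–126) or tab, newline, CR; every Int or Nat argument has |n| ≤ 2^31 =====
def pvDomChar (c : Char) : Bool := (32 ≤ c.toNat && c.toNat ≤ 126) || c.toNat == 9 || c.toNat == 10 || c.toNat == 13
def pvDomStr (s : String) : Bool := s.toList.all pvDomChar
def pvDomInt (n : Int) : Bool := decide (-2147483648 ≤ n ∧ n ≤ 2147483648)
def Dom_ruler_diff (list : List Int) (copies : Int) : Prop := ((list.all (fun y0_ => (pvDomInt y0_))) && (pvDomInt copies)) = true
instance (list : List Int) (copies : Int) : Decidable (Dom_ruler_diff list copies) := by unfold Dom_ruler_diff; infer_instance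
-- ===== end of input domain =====

-- B fuses A's two full pair passes (is_sidon_set validation, then histogram rebuild) into one
-- double loop that accumulates the histogram and returns None as soon as a count exceeds copies (simpler: one pass, no helper).

-- ===== PORT A =====
-- the loop body A's Python repeats verbatim in both is_sidon_set and ruler_diff:
-- d = |xi - xj|; if d not in diffs: diffs[d] = 0; diffs[d] += 1 — returns (d, updated diffs)
def pvStep (diffs : PySem.Dict Int Int) (xi xj : Int) : Int × PySem.Dict Int Int :=
  let d0 := xi - xj
  let d := if d0 < 0 then -d0 else d0
  let diffs1 := if diffs.contains d then diffs else diffs.insert d 0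
  (d, diffs1.insert d (diffs1.getD d 0 + 1))

-- inner 'for j in range(i+1, len(list))' loop of is_sidon_set; none = the early 'return False'
def pvSidonInner (xs : List Int) (g : Int) (xi : Int) (js : List Int)
    (diffs : PySem.Dict Int Int) : Option (PySem.Dict Int Int) :=
  match js with
  | [] => some diffs
  | j :: rest =>
    let p := pvStep diffs xi (PySem.List.pyGetD xs j 0)
    if p.2.getD p.1 0 > g then none else pvSidonInner xs g xi rest p.2

-- outer 'for i in range(len(list))' loop of is_sidon_set
def pvSidonOuter (xs : List Int) (g : Int) (is : List Int)
    (diffs : PySem.Dict Int Int) : Option (PySem.Dict Int Int) :=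
  match is with
  | [] => some diffs
  | i :: rest =>
    match pvSidonInner xs g (PySem.List.pyGetD xs i 0)
        (PySem.List.pyRange (i + 1) (xs.length : Int) 1) diffs with
    | none => none
    | some diffs' => pvSidonOuter xs g rest diffs'

def is_sidon_set (xs : List Int) (g : Int) : Bool :=
  (pvSidonOuter xs g (PySem.List.pyRange 0 (xs.length : Int) 1) PySem.Dict.empty).isSome

-- the second, unconditional histogram-building double loop of ruler_diff
def pvBuildInner (xs : List Int) (xi : Int) (js : List Int)
    (diffs : PySem.Dict Int Int) : PySem.Dict Int Int :=
  match js with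
  | [] => diffs
  | j :: rest => pvBuildInner xs xi rest (pvStep diffs xi (PySem.List.pyGetD xs j 0)).2

def pvBuildOuter (xs : List Int) (is : List Int)
    (diffs : PySem.Dict Int Int) : PySem.Dict Int Int :=
  match is with
  | [] => diffs
  | i :: rest =>
    pvBuildOuter xs rest (pvBuildInner xs (PySem.List.pyGetD xs i 0)
      (PySem.List.pyRange (i + 1) (xs.length : Int) 1) diffs)

def ruler_diff (list : List Int) (copies : Int) : Option (List (Int × Int)) :=
  if is_sidon_set list copies = false then none
  else some (pvBuildOuter list (PySem.List.pyRange 0 (list.length : Int) 1) PySem.Dict.empty).items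

-- ===== PORT B =====
-- single fused inner loop: count the difference and abort at once when the count exceeds copies
def pvFusedInner (xs : List Int) (copies : Int) (xi : Int) (js : List Int)
    (diffs : PySem.Dict Int Int) : Option (PySem.Dict Int Int) :=
  match js with
  | [] => some diffs
  | j :: rest =>
    let d := |xi - PySem.List.pyGetD xs j 0|
    let c := diffs.getD d 0 + 1
    if c > copies then none else pvFusedInner xs copies xi rest (diffs.insert d c)

def pvFusedOuter (xs : List Int) (copies : Int) (is : List Int)
    (diffs : PySem.Dict Int Int) : Option (PySem.Dict Int Int) :=
  match is with
  | [] => some diffs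
  | i :: rest =>
    match pvFusedInner xs copies (PySem.List.pyGetD xs i 0)
        (PySem.List.pyRange (i + 1) (xs.length : Int) 1) diffs with
    | none => none
    | some diffs' => pvFusedOuter xs copies rest diffs'

def ruler_diff_alt (list : List Int) (copies : Int) : Option (List (Int × Int)) :=
  (pvFusedOuter list copies (PySem.List.pyRange 0 (list.length : Int) 1) PySem.Dict.empty).map
    (fun d => d.items)

-- ===== PRECONDITION & SPEC =====
def Spec_ruler_diff (list : List Int) (copies : Int) (out : Option (List (Int × Int))) : Prop := out = ruler_diff_alt list copies
instance (list : List Int) (copies : Int) (out : Option (List (Int × Int))) : Decidable (Spec_ruler_diff list copies out) := by unfold Spec_ruler_diff; infer_instance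

-- ===== CLAIM (what is proved, stated in full; the proofs are below) =====
def Claim_equal_ruler_diff : Prop := ∀ (list : List Int) (copies : Int), Dom_ruler_diff list copies → Spec_ruler_diff list copies (ruler_diff list copies)

-- ===== LEMMAS AND PROOFS =====

-- inserting twice at the same key is one insert
lemma pv_insert_insert (d : PySem.Dict Int Int) (k v w : Int) :
    (d.insert k v).insert k w = d.insert k w := by
  apply PySem.Dict.ext
  rw [PySem.Dict.items_insert_of_contains _ _ (PySem.Dict.contains_insert_self d k v),
      PySem.Dict.items_insert, PySem.Dict.items_insert]
  by_cases h : d.contains k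
  · simp only [h, if_true, List.map_map]
    apply List.map_congr_left
    intro p _
    rcases eq_or_ne p.1 k with hp | hp <;> simp [hp]
  · simp only [h, Bool.false_eq_true, if_false, List.map_append, List.map_cons, List.map_nil,
      beq_self_eq_true, if_true]
    have hmap : ∀ p ∈ d.items, (if (p.1 == k) = true then (k, w) else p) = p := by
      intro p hp
      have hk : p.1 ≠ k := by
        intro hkk
        exact absurd ((PySem.Dict.contains_iff_mem_keys d k).mpr
          (hkk ▸ PySem.Dict.mem_keys_of_mem_items d hp)) (by simp [h])
      simp [hk]
    rw [List.map_congr_left hmap]; simp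

-- A's two-step 'if d not in diffs: diffs[d]=0; diffs[d]+=1' is B's one counting insert
lemma pv_step_eq (diffs : PySem.Dict Int Int) (d : Int) :
    (if diffs.contains d then diffs else diffs.insert d 0).insert d
      ((if diffs.contains d then diffs else diffs.insert d 0).getD d 0 + 1)
    = diffs.insert d (diffs.getD d 0 + 1) := by
  by_cases h : diffs.contains d
  · simp [h]
  · simp only [h, Bool.false_eq_true, if_false, PySem.Dict.getD_insert_self, pv_insert_insert,
      PySem.Dict.getD_of_not_contains diffs 0 (by simpa using h)]

lemma pv_abs_eq (a : Int) : |a| = if a < 0 then -a else a := by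
  split_ifs with h
  · exact abs_of_neg h
  · exact abs_of_nonneg (not_lt.1 h)

lemma pvStep_fst (diffs : PySem.Dict Int Int) (xi xj : Int) :
    (pvStep diffs xi xj).1 = |xi - xj| := by
  simp only [pvStep, pv_abs_eq]

lemma pvStep_snd (diffs : PySem.Dict Int Int) (xi xj : Int) :
    (pvStep diffs xi xj).2 = diffs.insert |xi - xj| (diffs.getD |xi - xj| 0 + 1) := by
  simp only [pvStep, pv_abs_eq, pv_step_eq]

lemma pvFusedInner_eq_sidonInner (xs : List Int) (g xi : Int) (js : List Int)
    (diffs : PySem.Dict Int Int) :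
    pvFusedInner xs g xi js diffs = pvSidonInner xs g xi js diffs := by
  induction js generalizing diffs with
  | nil => rfl
  | cons j rest ih =>
    simp only [pvFusedInner, pvSidonInner, pvStep_fst, pvStep_snd, PySem.Dict.getD_insert_self]
    split_ifs <;> first | rfl | exact ih _

lemma pvFusedOuter_eq_sidonOuter (xs : List Int) (g : Int) (is : List Int)
    (diffs : PySem.Dict Int Int) :
    pvFusedOuter xs g is diffs = pvSidonOuter xs g is diffs := by
  induction is generalizing diffs with
  | nil => rfl
  | cons i rest ih =>
    simp only [pvFusedOuter, pvSidonOuter, pvFusedInner_eq_sidonInner]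
    cases pvSidonInner xs g (PySem.List.pyGetD xs i 0)
        (PySem.List.pyRange (i + 1) (xs.length : Int) 1) diffs with
    | none => rfl
    | some d' => exact ih _

-- when the validation loop does not abort, it has built exactly the histogram
lemma pvSidonInner_some (xs : List Int) (g xi : Int) (js : List Int)
    (diffs out : PySem.Dict Int Int) (h : pvSidonInner xs g xi js diffs = some out) :
    pvBuildInner xs xi js diffs = out := by
  induction js generalizing diffs with
  | nil => simpa [pvSidonInner, pvBuildInner] using h
  | cons j rest ih =>
    simp only [pvSidonInner] at h
    simp only [pvBuildInner]
    split at h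
    · cases h
    · exact ih _ h

lemma pvSidonOuter_some (xs : List Int) (g : Int) (is : List Int)
    (diffs out : PySem.Dict Int Int) (h : pvSidonOuter xs g is diffs = some out) :
    pvBuildOuter xs is diffs = out := by
  induction is generalizing diffs with
  | nil => simpa [pvSidonOuter, pvBuildOuter] using h
  | cons i rest ih =>
    simp only [pvSidonOuter] at h
    simp only [pvBuildOuter]
    cases hin : pvSidonInner xs g (PySem.List.pyGetD xs i 0)
        (PySem.List.pyRange (i + 1) (xs.length : Int) 1) diffs with
    | none => rw [hin] at h; cases h
    | some d' =>
      rw [hin] at h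
      rw [pvSidonInner_some _ _ _ _ _ _ hin]
      exact ih _ h

-- ===== VERDICT (by name: the statement is the Claim_ definition above) =====
theorem ruler_diff_spec : Claim_equal_ruler_diff := by
  intro list copies _
  unfold Spec_ruler_diff ruler_diff ruler_diff_alt is_sidon_set
  rw [pvFusedOuter_eq_sidonOuter]
  cases h : pvSidonOuter list copies (PySem.List.pyRange 0 (list.length : Int) 1)
      PySem.Dict.empty with
  | none => simp
  | some out => simp [pvSidonOuter_some _ _ _ _ _ h]
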